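-- pv_equiv track=rewrite | github.com/rahulraj0621/tata_steel-employee-data-analysis | generate_presentation.py | parse_outline_sections
-- ===== SOURCE A (Python) =====
-- def parse_outline_sections(outline):
--     slides = []
--     current_title = None
--     current_content = []
--     for line in outline.splitlines():
--         if line.startswith('## Slide'):
--             if current_title:
--                 slides.append((current_title, current_content))
--             current_title = line.replace('## ', '').strip()
--             current_content = []
--         elif line.startswith('- '):
--             current_content.append(line[2:].strip())
--         elif line.strip() and not line.startswith('---'):
--             current_content.append(line.strip())
--     if current_title:
--         slides.append((current_title, current_content))
--     return slides
-- ===== SOURCE B (Python) =====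
-- def parse_outline_sections(outline):
--     slides = []
--     content = []
--     for line in reversed(outline.splitlines()):
--         if line.startswith('## Slide'):
--             slides.insert(0, (line.replace('## ', '').strip(), content))
--             content = []
--         elif line.startswith('- '):
--             content.insert(0, line[2:].strip())
--         elif line.strip() and not line.startswith('---'):
--             content.insert(0, line.strip())
--     return slides
-- ===== Notes on version B (the rewrite author's own statement) =====
-- stated objective: alternative
-- what changed: Replaces A's forward state machine with current_title/current_content accumulators and a final flush by a single reverse-order pass that builds the slide list back-to-front, so no pending-title state or end-of-loop flush exists.
import Mathlib
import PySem

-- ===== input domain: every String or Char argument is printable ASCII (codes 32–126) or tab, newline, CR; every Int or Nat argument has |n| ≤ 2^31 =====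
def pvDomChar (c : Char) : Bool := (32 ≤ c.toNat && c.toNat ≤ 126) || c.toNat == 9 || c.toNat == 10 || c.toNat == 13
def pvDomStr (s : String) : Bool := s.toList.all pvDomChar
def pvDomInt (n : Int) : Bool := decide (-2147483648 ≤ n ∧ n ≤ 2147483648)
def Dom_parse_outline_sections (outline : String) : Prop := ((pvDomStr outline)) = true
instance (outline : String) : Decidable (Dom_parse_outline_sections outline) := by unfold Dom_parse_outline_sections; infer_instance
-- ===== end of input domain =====

-- B replaces A's running title/content state machine (with its final flush) by a single
-- reverse-order pass that builds the slide list back-to-front; alternative decomposition, same cost.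


-- ===== PORT A =====
-- A's for-loop as structural recursion over the lines, state (slides, current_title, current_content);
-- `if current_title:` is Python truthiness: none or empty string is falsy.
def pvAloop : List String → List (String × List String) → Option String → List String → List (String × List String)
  | [], slides, ct, cc =>
      (match ct with
       | some t => if t != "" then slides ++ [(t, cc)] else slides
       | none => slides)
  | line :: rest, slides, ct, cc =>
      if PySem.Str.startswith line "## Slide" then
        pvAloop rest
          (match ct with
           | some t => if t != "" then slides ++ [(t, cc)] else slides
           | none => slides)
          (some (PySem.Str.strip (PySem.Str.replace line "## " ""))) []
      else if PySem.Str.startswith line "- " then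
        pvAloop rest slides ct (cc ++ [PySem.Str.strip (PySem.Str.slice line (some 2) none)])
      else if (PySem.Str.strip line != "") && !(PySem.Str.startswith line "---") then
        pvAloop rest slides ct (cc ++ [PySem.Str.strip line])
      else
        pvAloop rest slides ct cc

def parse_outline_sections (outline : String) : List (String × List String) :=
  pvAloop (PySem.Str.splitlines outline) [] none []

-- ===== PORT B =====
-- B's `for line in reversed(lines)` loop with insert(0, …) = structural recursion where the
-- tail (the later lines) is processed first; state (slides, content), output built back-to-front.
def pvBloop : List String → List (String × List String) × List String
  | [] => ([], [])
  | line :: rest =>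
      let sc := pvBloop rest
      if PySem.Str.startswith line "## Slide" then
        ((PySem.Str.strip (PySem.Str.replace line "## " ""), sc.2) :: sc.1, [])
      else if PySem.Str.startswith line "- " then
        (sc.1, PySem.Str.strip (PySem.Str.slice line (some 2) none) :: sc.2)
      else if (PySem.Str.strip line != "") && !(PySem.Str.startswith line "---") then
        (sc.1, PySem.Str.strip line :: sc.2)
      else
        sc

def parse_outline_sections_alt (outline : String) : List (String × List String) :=
  (pvBloop (PySem.Str.splitlines outline)).1

-- ===== PRECONDITION & SPEC =====
def Spec_parse_outline_sections (outline : String) (out : List (String × List String)) : Prop := out = parse_outline_sections_alt outline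
instance (outline : String) (out : List (String × List String)) : Decidable (Spec_parse_outline_sections outline out) := by unfold Spec_parse_outline_sections; infer_instance

-- ===== CLAIM (what is proved, stated in full; the proofs are below) =====
def Claim_equal_parse_outline_sections : Prop := ∀ (outline : String), Dom_parse_outline_sections outline → Spec_parse_outline_sections outline (parse_outline_sections outline)

-- ===== LEMMAS AND PROOFS =====

-- a character survives dropWhile if it does not satisfy the predicate
theorem pv_mem_dropWhile {α : Type} (p : α → Bool) (c : α) :
    ∀ l : List α, c ∈ l → p c = false → c ∈ List.dropWhile p l := by
  intro l hc hp
  induction l with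
  | nil => cases hc
  | cons a t ih =>
      by_cases ha : p a = true
      · rw [List.dropWhile_cons_of_pos ha]
        rcases List.mem_cons.mp hc with h | h
        · subst h; rw [hp] at ha; cases ha
        · exact ih h
      · rw [List.dropWhile_cons_of_neg ha]; exact hc

theorem pv_mem_strip (c : Char) (s : List Char) (hc : c ∈ s)
    (hsp : PySem.Chars.isspace c = false) : c ∈ PySem.Chars.strip s := by
  unfold PySem.Chars.strip PySem.Chars.lstrip PySem.Chars.rstrip
  apply List.mem_reverse.mpr
  apply pv_mem_dropWhile _ _ _ _ hsp
  apply List.mem_reverse.mpr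
  exact pv_mem_dropWhile _ _ _ hc hsp

-- a character not occurring in `old` survives replace
theorem pv_mem_replace_go (old new : List Char) (c : Char) (hc : c ∉ old) :
    ∀ (fuel : Nat) (l acc : List Char), (c ∈ l ∨ c ∈ acc) →
      c ∈ PySem.Chars.replace.go old new fuel l acc := by
  intro fuel
  induction fuel with
  | zero =>
      intro l acc h
      unfold PySem.Chars.replace.go
      simp only [List.mem_append, List.mem_reverse]
      tauto
  | succ n ih =>
      intro l acc h
      cases l with
      | nil =>
          unfold PySem.Chars.replace.go
          simp only [List.mem_reverse]
          rcases h with h | h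
          · cases h
          · exact h
      | cons a t =>
          unfold PySem.Chars.replace.go
          by_cases hp : old.isPrefixOf (a :: t) = true
          · simp only [hp, if_true]
            apply ih
            rcases h with h | h
            · left
              have hpre : old <+: (a :: t) := List.isPrefixOf_iff_prefix.mp hp
              obtain ⟨u, hu⟩ := hpre
              have : List.drop old.length (a :: t) = u := by
                rw [← hu]; simp
              rw [this]
              rw [← hu] at h
              rcases List.mem_append.mp h with h' | h'
              · exact absurd h' hc
              · exact h'
            · right; simp [h]
          · simp only [hp]
            apply ih
            rcases h with h | h
            · rcases List.mem_cons.mp h with h' | h'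
              · right; simp [h']
              · left; exact h'
            · right; simp [h]

theorem pv_mem_replace (old new l : List Char) (c : Char) (hc : c ∈ l) (hold : c ∉ old)
    (hne : old ≠ []) : c ∈ PySem.Chars.replace l old new := by
  unfold PySem.Chars.replace
  rw [if_neg (by simpa using hne)]
  exact pv_mem_replace_go old new c hold _ l [] (Or.inl hc)

-- a line starting with '## Slide' yields a non-empty title: the 'S' survives both
-- replace('## ', '') and strip()
theorem pv_title_ne (l : String) (h : PySem.Str.startswith l "## Slide" = true) :
    PySem.Str.strip (PySem.Str.replace l "## " "") ≠ "" := by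
  intro he
  have he' : (PySem.Str.strip (PySem.Str.replace l "## " "")).toList = [] := by
    rw [he]; rfl
  simp only [PySem.Str.toList_strip, PySem.Str.toList_replace] at he'
  have hpre : ("## Slide").toList <+: l.toList := by
    have := PySem.Str.startswith_eq l "## Slide"
    rw [this] at h
    exact (PySem.Chars.startswith_iff _ _).mp h
  have hS : 'S' ∈ l.toList := hpre.subset (by decide)
  have hmem : 'S' ∈ PySem.Chars.strip (PySem.Chars.replace l.toList ("## ").toList ("").toList) := by
    apply pv_mem_strip _ _ _ (by decide)
    exact pv_mem_replace _ _ _ _ hS (by decide) (by decide)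
  rw [he'] at hmem
  cases hmem

-- step equations for pvBloop, one per branch of B's loop body
theorem pvBloop_bound (line : String) (rest : List String)
    (hb : PySem.Str.startswith line "## Slide" = true) :
    pvBloop (line :: rest) =
      ((PySem.Str.strip (PySem.Str.replace line "## " ""), (pvBloop rest).2) :: (pvBloop rest).1, []) := by
  conv_lhs => rw [pvBloop.eq_def]
  simp at hb
  simp [hb]

theorem pvBloop_dash (line : String) (rest : List String)
    (hb : PySem.Str.startswith line "## Slide" = false)
    (hd : PySem.Str.startswith line "- " = true) :
    pvBloop (line :: rest) =
      ((pvBloop rest).1, PySem.Str.strip (PySem.Str.slice line (some 2) none) :: (pvBloop rest).2) := by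
  conv_lhs => rw [pvBloop.eq_def]
  simp at hb hd
  simp [hb, hd]

theorem pvBloop_text (line : String) (rest : List String)
    (hb : PySem.Str.startswith line "## Slide" = false)
    (hd : PySem.Str.startswith line "- " = false)
    (hs : ((PySem.Str.strip line != "") && !(PySem.Str.startswith line "---")) = true) :
    pvBloop (line :: rest) = ((pvBloop rest).1, PySem.Str.strip line :: (pvBloop rest).2) := by
  conv_lhs => rw [pvBloop.eq_def]
  simp at hb hd hs
  simp [hb, hd, hs]

theorem pvBloop_skip (line : String) (rest : List String)
    (hb : PySem.Str.startswith line "## Slide" = false)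
    (hd : PySem.Str.startswith line "- " = false)
    (hs : ((PySem.Str.strip line != "") && !(PySem.Str.startswith line "---")) = false) :
    pvBloop (line :: rest) = pvBloop rest := by
  conv_lhs => rw [pvBloop.eq_def]
  simp at hb hd hs
  simp [hb, hd]
  intro h1 h2
  simp [hs h1] at h2

-- the bridge: A's state machine against B's reverse pass, for every intermediate state
theorem pv_loop_bridge : ∀ (lines : List String) (slides : List (String × List String))
    (ct : Option String) (cc : List String),
    pvAloop lines slides ct cc =
      (match ct with
       | some t => if t != "" then slides ++ (t, cc ++ (pvBloop lines).2) :: (pvBloop lines).1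
                   else slides ++ (pvBloop lines).1
       | none => slides ++ (pvBloop lines).1) := by
  intro lines
  induction lines with
  | nil =>
      intro slides ct cc
      cases ct with
      | none => simp [pvAloop, pvBloop]
      | some t =>
          by_cases ht : (t != "") = true
          · simp [pvAloop, pvBloop, ht]
          · simp only [Bool.not_eq_true] at ht
            simp [pvAloop, pvBloop, ht]
  | cons line rest ih =>
      intro slides ct cc
      by_cases hb : PySem.Str.startswith line "## Slide" = true
      · have htitle : (PySem.Str.strip (PySem.Str.replace line "## " "") != "") = true := by
          simpa using pv_title_ne line hb
        rw [pvAloop.eq_def]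
        simp only [if_pos hb]
        rw [ih, pvBloop_bound line rest hb]
        cases ct with
        | none => simp [htitle]
        | some t =>
            by_cases ht : (t != "") = true
            · simp [htitle, ht]
            · simp only [Bool.not_eq_true] at ht
              simp [htitle, ht]
      · have hb' : PySem.Str.startswith line "## Slide" = false := by simpa using hb
        by_cases hd : PySem.Str.startswith line "- " = true
        · rw [pvAloop.eq_def]
          simp only [if_neg hb, if_pos hd]
          rw [ih, pvBloop_dash line rest hb' hd]
          cases ct with
          | none => simp
          | some t =>
              by_cases ht : (t != "") = true
              · simp [ht]
              · simp only [Bool.not_eq_true] at ht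
                simp [ht]
        · have hd' : PySem.Str.startswith line "- " = false := by simpa using hd
          by_cases hs : ((PySem.Str.strip line != "") && !(PySem.Str.startswith line "---")) = true
          · rw [pvAloop.eq_def]
            simp only [if_neg hb, if_neg hd, if_pos hs]
            rw [ih, pvBloop_text line rest hb' hd' hs]
            cases ct with
            | none => simp
            | some t =>
                by_cases ht : (t != "") = true
                · simp [ht]
                · simp only [Bool.not_eq_true] at ht
                  simp [ht]
          · have hs' : ((PySem.Str.strip line != "") && !(PySem.Str.startswith line "---")) = false := by
              simpa using hs
            rw [pvAloop.eq_def]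
            simp only [if_neg hb, if_neg hd, if_neg hs]
            rw [ih, pvBloop_skip line rest hb' hd' hs']

-- ===== VERDICT (by name: the statement is the Claim_ definition above) =====
theorem parse_outline_sections_spec : Claim_equal_parse_outline_sections := by
  intro outline _
  unfold Spec_parse_outline_sections parse_outline_sections parse_outline_sections_alt
  rw [pv_loop_bridge]
  simp
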